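-- pv_equiv track=rewrite | github.com/argallmr/imef | imef/efield/model_creation/NN_functions.py | reverse_bins
-- ===== SOURCE A (Python) =====
-- def reverse_bins(bins, length_of_data, keep_overlapping = False):
--     reversed_bins = []
--     counter = 0
--
--     while counter < len(bins):
--         if counter == 0:
--             # put first bin in list (if needed)
--             if bins[0][0] == 0:
--                 pass
--             else:
--                 reversed_bins.append([0, bins[0][0]])
--         else:
--             # Put reversed bins in list. if the bins from bins overlap with each other (which can occur in get_storm_intervals), then ignore them while reversing unless specified otherwise
--             if keep_overlapping == True or bins[counter - 1][1] < bins[counter][0]: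
--                 reversed_bins.append([bins[counter - 1][1], bins[counter][0]])
--         counter += 1
--
--     # put last bin in list (if needed)
--     if bins[-1][1] != length_of_data:
--         reversed_bins.append([bins[-1][1], length_of_data])
--
--     return reversed_bins
-- ===== SOURCE B (Python) =====
-- def reverse_bins(bins, length_of_data, keep_overlapping=False):
--     # Boundary-point view: the gaps are the even/odd pairs of the flattened
--     # point sequence 0, b0[0], b0[1], b1[0], ..., b(n-1)[1], length_of_data.
--     pts = [0]
--     for b in bins:
--         pts.append(b[0])
--         pts.append(b[1])
--     pts.append(length_of_data)
--     n = len(bins)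
--     out = []
--     for i in range(n + 1):
--         s, e = pts[2 * i], pts[2 * i + 1]
--         if i == 0 or i == n:
--             if s != e:
--                 out.append([s, e])
--         elif keep_overlapping or s < e:
--             out.append([s, e])
--     return out
-- ===== Notes on version B (the rewrite author's own statement) =====
-- stated objective: alternative
-- what changed: B first flattens the bins into one boundary-point sequence 0, b0[0], b0[1], ..., length_of_data, then emits the even/odd point pairs, with an index test separating the outer (endpoint-inequality) pairs from the inner (keep_overlapping or strict-order) pairs; A instead walks the bin list with a counter and an in-loop counter==0 special case plus a trailing append.
import Mathlib
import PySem

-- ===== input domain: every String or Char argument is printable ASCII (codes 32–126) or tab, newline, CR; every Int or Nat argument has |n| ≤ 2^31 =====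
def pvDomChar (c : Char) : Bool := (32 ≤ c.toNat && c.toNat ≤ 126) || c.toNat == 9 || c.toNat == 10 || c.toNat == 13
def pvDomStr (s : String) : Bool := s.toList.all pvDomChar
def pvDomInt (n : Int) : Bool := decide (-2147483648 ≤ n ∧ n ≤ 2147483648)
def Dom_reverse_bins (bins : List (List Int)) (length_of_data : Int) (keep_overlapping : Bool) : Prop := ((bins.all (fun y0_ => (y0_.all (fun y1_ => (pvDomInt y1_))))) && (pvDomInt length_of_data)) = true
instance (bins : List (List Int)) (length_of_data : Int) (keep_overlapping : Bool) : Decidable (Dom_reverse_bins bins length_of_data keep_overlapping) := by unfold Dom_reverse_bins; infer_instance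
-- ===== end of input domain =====

-- B flattens the bins into one boundary-point sequence 0, b0[0], b0[1], …, length_of_data and emits its
-- even/odd point pairs by index, instead of A's counter-driven walk over the bin list (return value only).

-- ===== PORT A =====
-- bins[i][j]: out-of-range indices are excluded by Pre_reverse_bins, so the default is never reached there
def pvAtA (bins : List (List Int)) (i j : Int) : Int :=
  PySem.List.pyGetD (PySem.List.pyGetD bins i []) j 0

-- the body of A's while loop at counter value c
def pvStep (bins : List (List Int)) (keep : Bool) (acc : List (List Int)) (c : Nat) : List (List Int) :=
  if c = 0 then
    if pvAtA bins 0 0 = 0 then acc else acc ++ [[0, pvAtA bins 0 0]]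
  else
    if keep = true ∨ pvAtA bins ((c : Int) - 1) 1 < pvAtA bins (c : Int) 0 then
      acc ++ [[pvAtA bins ((c : Int) - 1) 1, pvAtA bins (c : Int) 0]]
    else acc

def reverse_bins (bins : List (List Int)) (length_of_data : Int) (keep_overlapping : Bool) : List (List Int) :=
  -- while counter < len(bins): … ; counter += 1   ⇒ fold over counter = 0,…,len-1
  let rb := (List.range bins.length).foldl (pvStep bins keep_overlapping) []
  if pvAtA bins (-1) 1 ≠ length_of_data then rb ++ [[pvAtA bins (-1) 1, length_of_data]] else rb

-- ===== PORT B =====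
-- b[0] / b[1] of one bin; Pre_ guarantees length ≥ 2 so the default is never reached there
def pvBin0 (b : List Int) : Int := PySem.List.pyGetD b 0 0
def pvBin1 (b : List Int) : Int := PySem.List.pyGetD b 1 0

-- the boundary-point list: pts = [0]; for b in bins: pts += [b[0], b[1]]; pts += [length_of_data]
def pvPts (bins : List (List Int)) (L : Int) : List Int :=
  (bins.foldl (fun acc b => acc ++ [pvBin0 b, pvBin1 b]) [0]) ++ [L]

-- the body of B's for-loop over i in range(n + 1): which gap (if any) pair i contributes
def pvEmit (pts : List Int) (n : Nat) (keep : Bool) (i : Nat) : Option (List Int) :=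
  let s := PySem.List.pyGetD pts ((2 * i : Nat) : Int) 0
  let e := PySem.List.pyGetD pts ((2 * i + 1 : Nat) : Int) 0
  if i = 0 ∨ i = n then (if s ≠ e then some [s, e] else none)
  else if keep = true ∨ s < e then some [s, e] else none

def reverse_bins_alt (bins : List (List Int)) (length_of_data : Int) (keep_overlapping : Bool) : List (List Int) :=
  let pts := pvPts bins length_of_data
  let n := bins.length
  (List.range (n + 1)).filterMap (pvEmit pts n keep_overlapping)

-- ===== PRECONDITION & SPEC =====
-- Pre_ excludes exactly the inputs where A raises IndexError: empty bins (bins[-1]) or an inner bin with fewer than 2 entries.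
def Pre_reverse_bins (bins : List (List Int)) (length_of_data : Int) (keep_overlapping : Bool) : Prop :=
  bins ≠ [] ∧ ∀ b ∈ bins, 2 ≤ b.length
instance (bins : List (List Int)) (length_of_data : Int) (keep_overlapping : Bool) : Decidable (Pre_reverse_bins bins length_of_data keep_overlapping) := by unfold Pre_reverse_bins; infer_instance

def pvWitness_reverse_bins : List (List Int) × Int × Bool := ([[1, 3], [5, 7]], 10, false)

def Spec_reverse_bins (bins : List (List Int)) (length_of_data : Int) (keep_overlapping : Bool) (out : List (List Int)) : Prop := out = reverse_bins_alt bins length_of_data keep_overlapping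
instance (bins : List (List Int)) (length_of_data : Int) (keep_overlapping : Bool) (out : List (List Int)) : Decidable (Spec_reverse_bins bins length_of_data keep_overlapping out) := by unfold Spec_reverse_bins; infer_instance

-- ===== CLAIM =====
def Claim_equal_reverse_bins : Prop := ∀ (bins : List (List Int)) (length_of_data : Int) (keep_overlapping : Bool), Dom_reverse_bins bins length_of_data keep_overlapping → Pre_reverse_bins bins length_of_data keep_overlapping → Spec_reverse_bins bins length_of_data keep_overlapping (reverse_bins bins length_of_data keep_overlapping)

-- ===== LEMMAS AND PROOFS =====

-- the gap contributed by one consecutive pair of bins (common shape both characterizations reach)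
def pvGap (keep : Bool) (pc : List Int × List Int) : Option (List Int) :=
  if keep = true ∨ pvBin1 pc.1 < pvBin0 pc.2 then some [pvBin1 pc.1, pvBin0 pc.2] else none

lemma pvAtA_nat (bins : List (List Int)) (n : Nat) (j : Int) (h : n < bins.length) :
    pvAtA bins (n : Int) j = PySem.List.pyGetD bins[n] j 0 := by
  simp [pvAtA, List.getElem?_eq_getElem h]

-- ---- characterization of A's loop ----
lemma pvLoop_eq (bins : List (List Int)) (keep : Bool) (n : Nat) (h1 : 1 ≤ n) (h2 : n ≤ bins.length) :
    (List.range n).foldl (pvStep bins keep) [] =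
      (if pvBin0 (bins.headD []) ≠ 0 then [[0, pvBin0 (bins.headD [])]] else []) ++
        ((bins.zip bins.tail).take (n - 1)).filterMap (pvGap keep) := by
  induction n with
  | zero => omega
  | succ n ih =>
    rcases Nat.eq_or_lt_of_le h1 with h | h
    · have hn : n = 0 := by omega
      subst hn
      have hb : bins ≠ [] := by intro he; simp [he] at h2
      have hh : pvAtA bins 0 0 = pvBin0 (bins.headD []) := by
        simp only [pvAtA, pvBin0, PySem.List.pyGetD_zero]
        cases bins with
        | nil => simp at hb
        | cons b bs => simp
      simp [List.range_succ, pvStep, hh]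
    · obtain ⟨m, rfl⟩ : ∃ m, n = m + 1 := ⟨n - 1, by omega⟩
      have hlt : m + 1 < bins.length := by omega
      have hprev : m < bins.length := by omega
      rw [List.range_succ, List.foldl_append, ih (by omega) (by omega)]
      have hztl : bins.tail[m]? = some bins[m+1] :=
        by rw [List.getElem?_tail, List.getElem?_eq_getElem hlt]
      have hzel : (bins.zip bins.tail)[m]? = some (bins[m], bins[m+1]) := by
        rw [List.getElem?_zip_eq_some]
        exact ⟨List.getElem?_eq_getElem hprev, hztl⟩
      have htake : (bins.zip bins.tail).take (m + 1) =
          (bins.zip bins.tail).take m ++ [(bins[m], bins[m+1])] := by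
        rw [List.take_add_one, hzel]; simp
      simp only [List.foldl_cons, List.foldl_nil, pvStep, Nat.succ_ne_zero, if_false,
        Nat.add_sub_cancel, Nat.cast_add, Nat.cast_one]
      rw [show ((m:Int) + 1 - 1) = ((m:Nat) : Int) by omega]
      rw [pvAtA_nat bins m 1 hprev]
      have he : ((m:Int) + 1) = (((m + 1 : Nat)) : Int) := by push_cast; ring
      rw [he, pvAtA_nat bins (m+1) 0 hlt, htake, List.filterMap_append, ← List.append_assoc]
      by_cases hc : keep = true ∨ PySem.List.pyGetD bins[m] 1 0 < PySem.List.pyGetD bins[m+1] 0 0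
      · simp [hc, pvGap, pvBin1, pvBin0]
      · simp [pvGap, pvBin1, pvBin0, if_neg hc]

-- ---- facts about B's flattened point list ----
lemma pvFold_flat (bins : List (List Int)) (init : List Int) :
    bins.foldl (fun acc b => acc ++ [pvBin0 b, pvBin1 b]) init =
      init ++ bins.flatMap (fun b => [pvBin0 b, pvBin1 b]) := by
  induction bins generalizing init with
  | nil => simp
  | cons b bs ih => simp [ih, List.append_assoc]

lemma pvFlat_len (bins : List (List Int)) :
    (bins.flatMap (fun b => [pvBin0 b, pvBin1 b])).length = 2 * bins.length := by
  induction bins with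
  | nil => rfl
  | cons b bs ih => simp [ih]; ring

lemma pvFlat_even (bins : List (List Int)) (j : Nat) (h : j < bins.length) :
    (bins.flatMap (fun b => [pvBin0 b, pvBin1 b])).getD (2 * j) 0 = pvBin0 bins[j] := by
  induction bins generalizing j with
  | nil => simp at h
  | cons b bs ih =>
    cases j with
    | zero => simp
    | succ m =>
      have : 2 * (m + 1) = (2 * m) + 2 := by ring
      simp only [List.flatMap_cons, this, List.cons_append, List.getD, List.getElem?_cons_succ]
      exact ih m (by simpa using h)

lemma pvFlat_odd (bins : List (List Int)) (j : Nat) (h : j < bins.length) :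
    (bins.flatMap (fun b => [pvBin0 b, pvBin1 b])).getD (2 * j + 1) 0 = pvBin1 bins[j] := by
  induction bins generalizing j with
  | nil => simp at h
  | cons b bs ih =>
    cases j with
    | zero => simp
    | succ m =>
      have : 2 * (m + 1) + 1 = (2 * m + 1) + 2 := by ring
      simp only [List.flatMap_cons, this, List.cons_append, List.getD, List.getElem?_cons_succ]
      exact ih m (by simpa using h)

lemma pvPts_eq (bins : List (List Int)) (L : Int) :
    pvPts bins L = 0 :: (bins.flatMap (fun b => [pvBin0 b, pvBin1 b]) ++ [L]) := by
  rw [pvPts, pvFold_flat]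
  simp [List.flatMap_def]

lemma pvPts_even (bins : List (List Int)) (L : Int) (i : Nat) (h1 : 1 ≤ i) (h2 : i ≤ bins.length) :
    (pvPts bins L).getD (2 * i) 0 = pvBin1 bins[i - 1] := by
  obtain ⟨m, rfl⟩ : ∃ m, i = m + 1 := ⟨i - 1, by omega⟩
  have hm : m < bins.length := by omega
  have : 2 * (m + 1) = (2 * m + 1) + 1 := by ring
  rw [pvPts_eq, this]
  simp only [List.getD, List.getElem?_cons_succ]
  have hlen : 2 * m + 1 < (bins.flatMap (fun b => [pvBin0 b, pvBin1 b])).length := by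
    rw [pvFlat_len]; omega
  rw [List.getElem?_append_left hlen]
  have := pvFlat_odd bins m hm
  simpa [List.getD, Nat.add_sub_cancel] using this

lemma pvPts_odd (bins : List (List Int)) (L : Int) (i : Nat) (h : i < bins.length) :
    (pvPts bins L).getD (2 * i + 1) 0 = pvBin0 bins[i] := by
  rw [pvPts_eq]
  simp only [List.getD, List.getElem?_cons_succ]
  have hlen : 2 * i < (bins.flatMap (fun b => [pvBin0 b, pvBin1 b])).length := by
    rw [pvFlat_len]; omega
  rw [List.getElem?_append_left hlen]
  have := pvFlat_even bins i h
  simpa [List.getD] using this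

lemma pvPts_zero (bins : List (List Int)) (L : Int) : (pvPts bins L).getD 0 0 = 0 := by
  rw [pvPts_eq]; rfl

lemma pvPts_last (bins : List (List Int)) (L : Int) :
    (pvPts bins L).getD (2 * bins.length + 1) 0 = L := by
  rw [pvPts_eq]
  simp only [List.getD, List.getElem?_cons_succ]
  have hl := pvFlat_len bins
  rw [List.getElem?_append_right (by omega), hl]
  simp

-- zip of consecutive bins as an index map (with getD so no bound proofs appear in the function)
lemma pvZip_eq_map (bins : List (List Int)) :
    bins.zip bins.tail =
      (List.range (bins.length - 1)).map (fun j => (bins.getD j [], bins.getD (j + 1) [])) := by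
  apply List.ext_getElem
  · simp [List.length_zip]
  · intro k h1 h2
    have hk : k < bins.length - 1 := by simpa using h2
    have hk1 : k + 1 < bins.length := by omega
    have hk0 : k < bins.length := by omega
    simp [List.getElem_zip, List.getElem_tail, List.getD, hk0, hk1]

-- ---- characterization of B ----
lemma pvAlt_eq (bins : List (List Int)) (L : Int) (keep : Bool) (hne : bins ≠ []) :
    reverse_bins_alt bins L keep =
      (if pvBin0 (bins.headD []) ≠ 0 then [[0, pvBin0 (bins.headD [])]] else []) ++
        (bins.zip bins.tail).filterMap (pvGap keep) ++
        (if pvBin1 (bins.getLastD []) ≠ L then [[pvBin1 (bins.getLastD []), L]] else []) := by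
  obtain ⟨m, hm⟩ : ∃ m, bins.length = m + 1 :=
    ⟨bins.length - 1, by have := List.length_pos_of_ne_nil hne; omega⟩
  unfold reverse_bins_alt
  simp only [hm]
  -- split off the last index i = m + 1
  rw [show m + 1 + 1 = (m + 1) + 1 from rfl, List.range_succ, List.filterMap_append]
  -- split off the first index i = 0
  rw [List.range_succ_eq_map, List.filterMap_cons, List.filterMap_map]
  have h0 : bins[0] = bins.headD [] := by
    cases bins with | nil => exact absurd rfl hne | cons b bs => rfl
  have hlast : bins[m] = bins.getLastD [] := by
    have hg : bins.getLast? = some bins[m] := by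
      rw [List.getLast?_eq_getElem?]
      simp [hm]
    simp [List.getLastD_eq_getLast?, hg]
  -- the i = 0 contribution
  have hf0 : pvEmit (pvPts bins L) (m + 1) keep 0 =
      if pvBin0 (bins.headD []) ≠ 0 then some [0, pvBin0 (bins.headD [])] else none := by
    have he := pvPts_odd bins L 0 (by omega)
    simp only [pvEmit, Nat.mul_zero, Nat.zero_add, PySem.List.pyGetD_natCast,
      pvPts_zero bins L, he, h0, List.headD_eq_head?_getD]
    by_cases hc : pvBin0 (bins.head?.getD []) = 0 <;> simp [hc] <;> omega
  -- the i = m + 1 contribution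
  have hfl : pvEmit (pvPts bins L) (m + 1) keep (m + 1) =
      if pvBin1 (bins.getLastD []) ≠ L then some [pvBin1 (bins.getLastD []), L] else none := by
    have hs := pvPts_even bins L (m + 1) (by omega) (by omega)
    have hL : (pvPts bins L).getD (2 * (m + 1) + 1) 0 = L := by
      have h := pvPts_last bins L; rw [hm] at h; exact h
    simp only [pvEmit, PySem.List.pyGetD_natCast, hs, hL, Nat.add_sub_cancel, hlast,
      List.getLastD_eq_getLast?]
    by_cases hc : pvBin1 (bins.getLast?.getD []) = L <;> simp [hc]
  -- the middle contributions
  have hmid : (List.range m).filterMap (fun j => pvEmit (pvPts bins L) (m + 1) keep (j + 1)) =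
      (bins.zip bins.tail).filterMap (pvGap keep) := by
    rw [pvZip_eq_map, hm, Nat.add_sub_cancel, List.filterMap_map]
    apply List.filterMap_congr
    intro j hj
    have hjm : j < m := by simpa using hj
    have hs := pvPts_even bins L (j + 1) (by omega) (by omega)
    have he := pvPts_odd bins L (j + 1) (by omega)
    have hgj : bins[j]? = some bins[j] := List.getElem?_eq_getElem (by omega)
    have hgj1 : bins[j + 1]? = some bins[j + 1] := List.getElem?_eq_getElem (by omega)
    have hjne : j ≠ m := by omega
    simp only [pvEmit, PySem.List.pyGetD_natCast, hs, he, Nat.add_sub_cancel]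
    simp [pvGap, hjne, List.getD, hgj, hgj1]
  simp only [List.filterMap_cons, List.filterMap_nil, Function.comp_def, Nat.succ_eq_add_one,
    hf0, hfl, hmid]
  by_cases h1 : pvBin0 (bins.head?.getD []) = 0 <;>
    by_cases h2 : pvBin1 (bins.getLast?.getD []) = L <;>
      simp [h1, h2]

theorem reverse_bins_spec : Claim_equal_reverse_bins := by
  intro bins L keep _ hpre
  obtain ⟨hne, _⟩ := hpre
  have hlen1 : 1 ≤ bins.length := List.length_pos_of_ne_nil hne
  have hmain := pvLoop_eq bins keep bins.length hlen1 le_rfl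
  have htakeall : (bins.zip bins.tail).take (bins.length - 1) = bins.zip bins.tail :=
    List.take_of_length_le (by simp)
  rw [htakeall] at hmain
  have hlast : pvAtA bins (-1) 1 = pvBin1 (bins.getLastD []) := by
    unfold pvAtA pvBin1
    rw [PySem.List.pyGetD_neg_one (h := hne), List.getLastD_eq_getLast?,
      List.getLast?_eq_some_getLast hne, Option.getD_some]
  unfold Spec_reverse_bins reverse_bins
  rw [pvAlt_eq bins L keep hne]
  simp only [hmain, hlast]
  by_cases hc : pvBin1 (bins.getLast?.getD []) = L <;> simp [hc, List.append_assoc]
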